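-- pv_equiv track=rewrite | github.com/Neverous/ii-nlp15 | List2/1.py | generate_typos
-- ===== SOURCE A (Python) =====
-- ALPHABET = 'abcdefghijklmnopqrstuwvxyz'
--
-- def generate_typos(word, distance, d=0):
--     yield (word, d)
--     if d == distance:
--         return
--
--     # add letter
--     for pos in range(len(word)):
--         for letter in ALPHABET:
--             yield from generate_typos(word[:pos] + letter + word[pos:], distance, d + 1)
--
--     # remove letter
--     for pos in range(len(word)):
--         yield from generate_typos(word[:pos] + word[pos + 1:], distance, d + 1)
--
--     # change letter
--     for pos in range(len(word)):
--         for letter in ALPHABET: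
--             if letter != word[pos]:
--                 yield from generate_typos(word[:pos] + letter + word[pos + 1:], distance, d + 1)
--
--     # swap letters
--     for pos in range(len(word) - 1):
--         yield from generate_typos(word[:pos] + word[pos + 1] + word[pos] + word[pos + 2:], distance, d + 1)
-- ===== SOURCE B (Python) =====
-- ALPHABET = 'abcdefghijklmnopqrstuwvxyz'
--
-- def generate_typos(word, distance, d=0):
--     # iterative pre-order DFS with an explicit stack instead of recursive yield-from
--     stack = [(word, d)]
--     while stack:
--         w, k = stack.pop()
--         yield (w, k)
--         if k == distance:
--             continue
--         children = []
--         for pos in range(len(w)):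
--             for letter in ALPHABET:
--                 children.append(w[:pos] + letter + w[pos:])
--         for pos in range(len(w)):
--             children.append(w[:pos] + w[pos + 1:])
--         for pos in range(len(w)):
--             for letter in ALPHABET:
--                 if letter != w[pos]:
--                     children.append(w[:pos] + letter + w[pos + 1:])
--         for pos in range(len(w) - 1):
--             children.append(w[:pos] + w[pos + 1] + w[pos] + w[pos + 2:])
--         for child in reversed(children):
--             stack.append((child, k + 1))
-- ===== Notes on version B (the rewrite author's own statement) =====
-- stated objective: alternative
-- what changed: Replaces the recursive yield-from generator with an iterative pre-order DFS over an explicit stack: each popped node is yielded and its child words (built once into a list) are pushed in reverse so they pop in A's emission order.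
import Mathlib
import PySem

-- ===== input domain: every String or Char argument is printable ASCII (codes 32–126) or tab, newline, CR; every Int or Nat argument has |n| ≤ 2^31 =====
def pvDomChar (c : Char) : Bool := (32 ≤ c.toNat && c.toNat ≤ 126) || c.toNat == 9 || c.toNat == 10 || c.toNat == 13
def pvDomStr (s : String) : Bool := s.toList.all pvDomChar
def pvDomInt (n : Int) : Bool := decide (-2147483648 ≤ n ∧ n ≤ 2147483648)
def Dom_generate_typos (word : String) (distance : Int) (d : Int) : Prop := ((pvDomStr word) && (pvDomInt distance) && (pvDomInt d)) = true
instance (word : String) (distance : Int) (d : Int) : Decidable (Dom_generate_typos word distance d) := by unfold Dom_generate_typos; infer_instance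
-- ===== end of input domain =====

-- B replaces A's recursive generator by an iterative pre-order DFS with an explicit stack
-- (alternative decomposition, same cost); equivalence is about the materialised output list.

-- ===== PORT A =====
def pyALPHABET : List Char :=
  ['a','b','c','d','e','f','g','h','i','j','k','l','m','n','o','p','q','r','s','t','u','w','v','x','y','z']

-- word[:pos] + letter + word[pos:]  (exact, 0 ≤ pos ≤ len w)
def childAdd (w : List Char) (pos : Nat) (c : Char) : List Char := w.take pos ++ c :: w.drop pos
-- word[:pos] + word[pos+1:]  (exact, 0 ≤ pos < len w)
def childRemove (w : List Char) (pos : Nat) : List Char := w.take pos ++ w.drop (pos + 1)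
-- word[:pos] + letter + word[pos+1:]  (exact, 0 ≤ pos < len w)
def childChange (w : List Char) (pos : Nat) (c : Char) : List Char := w.take pos ++ c :: w.drop (pos + 1)
-- word[:pos] + word[pos+1] + word[pos] + word[pos+2:]  (exact, 0 ≤ pos < len w - 1)
def childSwap (w : List Char) (pos : Nat) : List Char :=
  w.take pos ++ w.getD (pos + 1) 'a' :: w.getD pos 'a' :: w.drop (pos + 2)

-- A's recursion, with fuel r = (distance - d).toNat (the exact recursion depth when d ≤ distance;
-- the `0` guard is only a totality guard — under Pre_ it is reached only when d == distance or w = [])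
def gA : Nat → List Char → Int → Int → List (String × Int)
  | r, w, distance, d =>
    (String.ofList w, d) ::
      (if d == distance then []
       else
         match r with
         | 0 => []
         | r' + 1 =>
           ((List.range w.length).flatMap fun pos =>
              pyALPHABET.flatMap fun c => gA r' (childAdd w pos c) distance (d + 1))
           ++ ((List.range w.length).flatMap fun pos => gA r' (childRemove w pos) distance (d + 1))
           ++ ((List.range w.length).flatMap fun pos =>
              pyALPHABET.flatMap fun c =>
                if c ≠ w.getD pos 'a' then gA r' (childChange w pos c) distance (d + 1) else [])
           ++ ((List.range (w.length - 1)).flatMap fun pos => gA r' (childSwap w pos) distance (d + 1)))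

def generate_typos (word : String) (distance : Int) (d : Int) : List (String × Int) :=
  gA ((distance - d).toNat) word.toList distance d

-- ===== PORT B =====
-- `children` as built by Source B's four phases, in emission order
def childrenOf (w : List Char) : List (List Char) :=
  ((List.range w.length).flatMap fun pos => pyALPHABET.map fun c => childAdd w pos c)
  ++ ((List.range w.length).map fun pos => childRemove w pos)
  ++ ((List.range w.length).flatMap fun pos =>
        pyALPHABET.flatMap fun c => if c ≠ w.getD pos 'a' then [childChange w pos c] else [])
  ++ ((List.range (w.length - 1)).map fun pos => childSwap w pos)

-- exact number of stack pops for the subtree rooted at a word with r remaining levels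
def szB : Nat → List Char → Nat
  | 0, _ => 1
  | r + 1, w => 1 + ((childrenOf w).map (szB r)).sum

-- the while-loop; stack head = top; `acc` collects the yields (newest first); fuel = exact
-- remaining pop count (the `0` guard is a totality guard, unreachable under Pre_)
def loopB : Nat → List (List Char × Int) → Int → List (String × Int) → List (String × Int)
  | _, [], _, acc => acc.reverse
  | 0, _ :: _, _, acc => acc.reverse
  | fuel + 1, (w, k) :: rest, distance, acc =>
    if k == distance then loopB fuel rest distance ((String.ofList w, k) :: acc)
    else loopB fuel ((childrenOf w).reverse.foldl (fun st c => (c, k + 1) :: st) rest) distance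
      ((String.ofList w, k) :: acc)

def generate_typos_alt (word : String) (distance : Int) (d : Int) : List (String × Int) :=
  loopB (szB ((distance - d).toNat) word.toList) [(word.toList, d)] distance []

-- ===== PRECONDITION & SPEC =====
-- Pre_ excludes exactly the inputs with d > distance and a nonempty word, on which A's recursion
-- never reaches d == distance and Python raises RecursionError (B's loop never terminates either).
def Pre_generate_typos (word : String) (distance : Int) (d : Int) : Prop :=
  d ≤ distance ∨ word = ""
instance (word : String) (distance : Int) (d : Int) : Decidable (Pre_generate_typos word distance d) := by
  unfold Pre_generate_typos; infer_instance

def pvWitness_generate_typos : String × Int × Int := ("ab", 1, 0)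

def Spec_generate_typos (word : String) (distance : Int) (d : Int) (out : List (String × Int)) : Prop := out = generate_typos_alt word distance d
instance (word : String) (distance : Int) (d : Int) (out : List (String × Int)) : Decidable (Spec_generate_typos word distance d out) := by unfold Spec_generate_typos; infer_instance

-- ===== CLAIM (what is proved, stated in full; the proofs are below) =====
def Claim_equal_generate_typos : Prop := ∀ (word : String) (distance : Int) (d : Int), Dom_generate_typos word distance d → Pre_generate_typos word distance d → Spec_generate_typos word distance d (generate_typos word distance d)

-- ===== LEMMAS AND PROOFS =====

theorem szB_pos (r : Nat) (w : List Char) : 1 ≤ szB r w := by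
  cases r <;> simp [szB]

theorem push_eq (cs : List (List Char)) (k : Int) (st : List (List Char × Int)) :
    cs.reverse.foldl (fun st c => (c, k + 1) :: st) st = cs.map (fun c => (c, k + 1)) ++ st := by
  induction cs generalizing st with
  | nil => simp
  | cons c cs ih => simp [List.foldl_append, ih]

theorem flatMap_ite_nil {α β : Type} (p : Prop) [Decidable p] (x : α) (g : α → List β) :
    (if p then [] else [x]).flatMap g = if p then [] else g x := by
  split <;> simp

theorem gA_succ_eq (r : Nat) (w : List Char) (distance d : Int) (hd : d ≠ distance) :
    gA (r + 1) w distance d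
      = (String.ofList w, d) :: (childrenOf w).flatMap (fun c => gA r c distance (d + 1)) := by
  rw [gA]
  simp [hd, childrenOf, List.flatMap_append, List.flatMap_assoc, List.flatMap_map,
    flatMap_ite_nil]

theorem loop_eq (fuel : Nat) (stack : List (List Char × Int)) (distance : Int)
    (acc : List (String × Int))
    (hgood : ∀ e ∈ stack, e.2 ≤ distance ∨ e.1 = ([] : List Char))
    (hfuel : fuel = (stack.map fun e => szB ((distance - e.2).toNat) e.1).sum) :
    loopB fuel stack distance acc
      = acc.reverse ++ stack.flatMap fun e => gA ((distance - e.2).toNat) e.1 distance e.2 := by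
  induction fuel generalizing stack acc with
  | zero =>
    cases stack with
    | nil => simp [loopB]
    | cons e rest =>
      exfalso
      have := szB_pos ((distance - e.2).toNat) e.1
      simp at hfuel
      omega
  | succ n ih =>
    cases stack with
    | nil => simp [loopB]
    | cons e rest =>
      obtain ⟨w, k⟩ := e
      simp only [List.map_cons, List.sum_cons] at hfuel
      have hrest : ∀ e ∈ rest, e.2 ≤ distance ∨ e.1 = ([] : List Char) := by
        intro e he; exact hgood e (List.mem_cons_of_mem _ he)
      by_cases hk : k = distance
      · subst hk
        have hr0 : ((k : Int) - k).toNat = 0 := by omega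
        rw [hr0] at hfuel
        have hfuel' : n = (rest.map fun e => szB ((k - e.2).toNat) e.1).sum := by
          simp [szB] at hfuel; omega
        rw [loopB]
        simp only [beq_self_eq_true, if_true]
        rw [ih rest _ hrest hfuel']
        simp [gA]
      · have hkd : (k == distance) = false := by simp [hk]
        rcases hgood (w, k) (List.mem_cons_self) with hle | hnil
        · -- k < distance: expand one level
          have hklt : k < distance := lt_of_le_of_ne hle hk
          obtain ⟨r', hr'⟩ : ∃ r', (distance - k).toNat = r' + 1 :=
            ⟨(distance - k).toNat - 1, by omega⟩
          have hchild : (distance - (k + 1)).toNat = r' := by omega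
          rw [hr'] at hfuel
          simp only [szB] at hfuel
          have hnew : ∀ e ∈ (childrenOf w).map (fun c => (c, k + 1)) ++ rest,
              e.2 ≤ distance ∨ e.1 = ([] : List Char) := by
            intro e he
            rcases List.mem_append.mp he with hm | hm
            · obtain ⟨c, _, rfl⟩ := List.mem_map.mp hm
              left; simpa using hklt
            · exact hrest e hm
          have hfuel' : n = (((childrenOf w).map (fun c => (c, k + 1)) ++ rest).map
              fun e => szB ((distance - e.2).toNat) e.1).sum := by
            simp only [List.map_append, List.map_map, List.sum_append, Function.comp_def,
              hchild]
            have he : (fun x => szB r' x) = szB r' := rfl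
            rw [he]
            omega
          rw [loopB]
          simp only [hkd, if_neg Bool.false_ne_true]
          rw [push_eq, ih _ _ hnew hfuel']
          simp only [List.flatMap_cons, List.flatMap_append, hr',
            gA_succ_eq r' w distance k hk]
          simp [hchild, List.flatMap_map]
        · -- w = [], k > distance: no children, one pop
          subst hnil
          have hch : childrenOf ([] : List Char) = [] := by decide
          have hfuel' : n = (rest.map fun e => szB ((distance - e.2).toNat) e.1).sum := by
            have := szB_pos ((distance - k).toNat) ([] : List Char)
            cases hsz : ((distance - k).toNat) with
            | zero => rw [hsz] at hfuel; simp [szB] at hfuel; omega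
            | succ m => rw [hsz] at hfuel; simp [szB, hch] at hfuel; omega
          rw [loopB]
          simp only [hkd, if_neg Bool.false_ne_true]
          rw [hch]
          simp only [List.reverse_nil, List.foldl_nil]
          rw [ih rest _ hrest hfuel']
          cases hsz : ((distance - k).toNat) <;> simp [hsz, gA, hk]

-- ===== VERDICT (by name: the statement is the Claim_ definition above) =====
theorem generate_typos_spec : Claim_equal_generate_typos := by
  intro word distance d _ hpre
  unfold Spec_generate_typos generate_typos generate_typos_alt
  rw [loop_eq]
  · simp
  · intro e he
    simp at he
    subst he
    rcases hpre with h | h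
    · left; exact h
    · right; simp [h]
  · simp
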